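-- pv_equiv track=rewrite | github.com/NoHyeokPark/codingTest | 2864.py | greed
-- ===== SOURCE A (Python) =====
-- def greed(c):
--     p = m = 0
--     x = 1
--     while c > 0:
--         n = c%10
--         if n == 5:
--             p += 1 * x
--         elif n == 6:
--             m += 1 * x
--         c = c//10
--         x *= 10
--     return (p, m)
-- ===== SOURCE B (Python) =====
-- def greed(c):
--     # recursion most-significant-digit-first; scales the partial results by ten
--     # instead of maintaining a power-of-ten multiplier
--     if c <= 0:
--         return (0, 0)
--     p, m = greed(c // 10)
--     d = c % 10
--     return (10 * p + (1 if d == 5 else 0), 10 * m + (1 if d == 6 else 0))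
-- ===== Notes on version B (the rewrite author's own statement) =====
-- stated objective: alternative
-- what changed: Replaces A's least-significant-first while loop that carries three accumulators (p, m and a power-of-ten multiplier x) by a direct recursion on the quotient by ten that builds both results back-to-front, scaling the recursive partial answers by ten so no multiplier state exists.
import Mathlib
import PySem

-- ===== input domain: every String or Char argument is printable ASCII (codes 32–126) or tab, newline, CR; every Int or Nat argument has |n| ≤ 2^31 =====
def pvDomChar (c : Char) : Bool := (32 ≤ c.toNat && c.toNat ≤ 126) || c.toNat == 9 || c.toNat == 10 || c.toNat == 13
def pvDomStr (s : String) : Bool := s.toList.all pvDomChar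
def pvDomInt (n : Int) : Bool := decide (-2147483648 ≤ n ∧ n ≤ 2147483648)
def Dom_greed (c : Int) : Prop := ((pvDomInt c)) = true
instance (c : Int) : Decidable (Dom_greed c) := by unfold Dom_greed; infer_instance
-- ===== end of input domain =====

-- B replaces A's LSB-first while loop (accumulators p, m and power-of-ten x) by a
-- direct recursion on the quotient by ten that scales the partial results by ten (alternative; same cost).

-- ===== PORT A =====
-- A's while loop, carrying its state (c, p, m, x); the Nat argument is fuel only
-- (the quotient shrinks on every step, so fuel c.toNat never runs out before the loop exits)
def greedLoop : Nat → Int → Int → Int → Int → Int × Int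
  | 0, _, p, m, _ => (p, m)
  | Nat.succ fuel, c, p, m, x =>
    if 0 < c then
      let n := PySem.Int.mod c 10
      let p' := if n = 5 then p + 1 * x else p
      let m' := if n = 5 then m else if n = 6 then m + 1 * x else m
      greedLoop fuel (PySem.Int.floordiv c 10) p' m' (x * 10)
    else (p, m)

def greed (c : Int) : Int × Int := greedLoop c.toNat c 0 0 1

-- ===== PORT B =====
-- B's recursion on the quotient by ten; the Nat argument is fuel only, as above
def greedAltGo : Nat → Int → Int × Int
  | 0, _ => (0, 0)
  | Nat.succ fuel, c =>
    if c ≤ 0 then (0, 0)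
    else
      let pm := greedAltGo fuel (PySem.Int.floordiv c 10)
      let d := PySem.Int.mod c 10
      (10 * pm.1 + (if d = 5 then 1 else 0), 10 * pm.2 + (if d = 6 then 1 else 0))

def greed_alt (c : Int) : Int × Int := greedAltGo c.toNat c

-- ===== PRECONDITION & SPEC =====
def Spec_greed (c : Int) (out : Int × Int) : Prop := out = greed_alt c
instance (c : Int) (out : Int × Int) : Decidable (Spec_greed c out) := by unfold Spec_greed; infer_instance

-- ===== CLAIM (what is proved, stated in full; the proofs are below) =====
def Claim_equal_greed : Prop := ∀ (c : Int), Dom_greed c → Spec_greed c (greed c)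

-- ===== LEMMAS AND PROOFS =====

-- enough fuel makes greedAltGo independent of the exact fuel
theorem greedAltGo_fuel : ∀ (f g : Nat) (c : Int), c.toNat ≤ f → c.toNat ≤ g →
    greedAltGo f c = greedAltGo g c := by
  intro f
  induction f with
  | zero =>
    intro g c hf _
    have hc : c ≤ 0 := by omega
    cases g with
    | zero => rfl
    | succ g => rw [greedAltGo, greedAltGo]; simp [hc]
  | succ f ih =>
    intro g c hf hg
    by_cases hc : c ≤ 0
    · cases g with
      | zero => rw [greedAltGo, greedAltGo]; simp [hc]
      | succ g => rw [greedAltGo, greedAltGo]; simp [hc]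
    · cases g with
      | zero => omega
      | succ g =>
        rw [greedAltGo, greedAltGo]
        have hd : (PySem.Int.floordiv c 10).toNat ≤ f ∧ (PySem.Int.floordiv c 10).toNat ≤ g := by
          simp only [PySem.Int.floordiv, Int.fdiv_eq_ediv]; omega
        rw [ih g (PySem.Int.floordiv c 10) hd.1 hd.2]

-- loop invariant: with enough fuel, the loop adds x times B's (scaled) answer to the accumulators
theorem greedLoop_eq_alt : ∀ (f : Nat) (c : Int), c.toNat ≤ f → ∀ (p m x : Int),
    greedLoop f c p m x = (p + x * (greed_alt c).1, m + x * (greed_alt c).2) := by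
  intro f
  induction f with
  | zero =>
    intro c hc p m x
    have hc0 : c ≤ 0 := by omega
    rw [greedLoop]
    unfold greed_alt
    have : c.toNat = 0 := by omega
    rw [this, greedAltGo]
    simp
  | succ f ih =>
    intro c hc p m x
    by_cases h : 0 < c
    · have hd : (PySem.Int.floordiv c 10).toNat ≤ f := by
        simp only [PySem.Int.floordiv, Int.fdiv_eq_ediv]; omega
      obtain ⟨k, hk⟩ : ∃ k, c.toNat = k + 1 := ⟨c.toNat - 1, by omega⟩
      rw [greedLoop]
      simp only [h, if_pos]
      rw [ih _ hd]
      unfold greed_alt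
      rw [hk, greedAltGo]
      simp only [not_le.mpr h, if_neg, not_false_iff]
      have hdk : (PySem.Int.floordiv c 10).toNat ≤ k := by
        simp only [PySem.Int.floordiv, Int.fdiv_eq_ediv]; omega
      rw [greedAltGo_fuel k (PySem.Int.floordiv c 10).toNat (PySem.Int.floordiv c 10) hdk le_rfl]
      refine Prod.ext ?_ ?_ <;> simp
      · split_ifs <;> ring
      · split_ifs
        all_goals first | (exfalso; omega) | ring
    · rw [greedLoop]
      unfold greed_alt
      have : c.toNat = 0 := by omega
      rw [this, greedAltGo]
      simp [h]

-- ===== VERDICT (by name: the statement is the Claim_ definition above) =====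
theorem greed_spec : Claim_equal_greed := by
  intro c _
  unfold Spec_greed greed
  rw [greedLoop_eq_alt c.toNat c le_rfl]
  ring_nf
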